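-- pv_equiv track=rewrite | github.com/blessleydylan/CP125-Class-Repo-2 | labs/lab05/exercise7/exercise7.py | find_conflicting_ports
-- ===== SOURCE A (Python) =====
-- def find_conflicting_ports(rules):
--     # Track the first action seen for each port
--     first_action = {}
--     conflicts = {}
--
--     for rule_id, port, action in rules:
--         if port not in first_action:
--             first_action[port] = action
--         else:
--             # Conflict occurs when a different action appears
--             if first_action[port] != action and port not in conflicts:
--                 conflicts[port] = rule_id
--
--     # Return sorted list of (port, rule_id)
--     return sorted(conflicts.items())
-- ===== SOURCE B (Python) =====
-- def find_conflicting_ports(rules):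
--     # Group the rules by port first, then judge each port's group in one scan.
--     groups = {}
--     for rule_id, port, action in rules:
--         groups.setdefault(port, []).append((rule_id, action))
--
--     conflicts = []
--     for port, entries in groups.items():
--         baseline = entries[0][1]
--         for rid, act in entries[1:]:
--             if act != baseline:
--                 conflicts.append((port, rid))
--                 break
--
--     return sorted(conflicts)
-- ===== Notes on version B (the rewrite author's own statement) =====
-- stated objective: alternative
-- what changed: B replaces A's single pass over two running dicts (first-action and conflicts) with a group-by-port pass followed by a per-group scan that takes the first entry's action as baseline and records the first later rule whose action differs.
import Mathlib
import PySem

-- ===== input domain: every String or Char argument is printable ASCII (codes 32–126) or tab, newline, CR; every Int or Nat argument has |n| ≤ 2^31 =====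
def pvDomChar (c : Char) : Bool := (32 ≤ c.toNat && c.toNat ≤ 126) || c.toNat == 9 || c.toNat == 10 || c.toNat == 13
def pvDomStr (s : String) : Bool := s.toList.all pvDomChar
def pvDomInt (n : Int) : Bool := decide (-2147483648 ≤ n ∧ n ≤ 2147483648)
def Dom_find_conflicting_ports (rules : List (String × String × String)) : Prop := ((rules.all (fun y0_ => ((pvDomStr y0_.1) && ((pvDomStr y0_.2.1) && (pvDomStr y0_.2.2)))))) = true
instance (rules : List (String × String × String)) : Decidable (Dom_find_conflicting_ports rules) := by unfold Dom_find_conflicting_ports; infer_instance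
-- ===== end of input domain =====

-- B groups the rules by port once and judges each port's group in a single scan,
-- instead of A's rule-by-rule loop over two running dicts (objective: alternative decomposition; same cost).


-- ===== PORT A =====
def find_conflicting_ports (rules : List (String × String × String)) : List (String × String) :=
  let st : PySem.Dict String String × PySem.Dict String String :=
    rules.foldl (fun st r =>
      let rule_id := r.1; let port := r.2.1; let action := r.2.2
      let fa := st.1; let cf := st.2
      if !fa.contains port then (fa.insert port action, cf)
      else if fa.getD port "" != action && !cf.contains port then (fa, cf.insert port rule_id)
      else (fa, cf)) (PySem.Dict.empty, PySem.Dict.empty)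
  PySem.List.sorted2 st.2.items (fun p => p.1) (fun p => p.2)

-- ===== PORT B =====
def find_conflicting_ports_alt (rules : List (String × String × String)) : List (String × String) :=
  let groups : PySem.Dict String (List (String × String)) :=
    rules.foldl (fun d r => d.modify r.2.1 [] (fun l => l ++ [(r.1, r.2.2)])) PySem.Dict.empty
  let conflicts : List (String × String) :=
    groups.items.foldl (fun acc pe =>
      match pe.2 with
      | [] => acc            -- unreachable: groups only holds nonempty entry lists
      | e0 :: rest =>
        match rest.find? (fun e => e.2 != e0.2) with
        | some e => acc ++ [(pe.1, e.1)]
        | none => acc) []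
  PySem.List.sorted2 conflicts (fun p => p.1) (fun p => p.2)

-- ===== PRECONDITION & SPEC =====
def Spec_find_conflicting_ports (rules : List (String × String × String)) (out : List (String × String)) : Prop := out = find_conflicting_ports_alt rules
instance (rules : List (String × String × String)) (out : List (String × String)) : Decidable (Spec_find_conflicting_ports rules out) := by unfold Spec_find_conflicting_ports; infer_instance

-- ===== CLAIM (what is proved, stated in full; the proofs are below) =====
def Claim_equal_find_conflicting_ports : Prop := ∀ (rules : List (String × String × String)), Dom_find_conflicting_ports rules → Spec_find_conflicting_ports rules (find_conflicting_ports rules)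

-- ===== LEMMAS AND PROOFS =====

-- the (rule_id, action) entries of a given port, in rule order
def pvEntries (rules : List (String × String × String)) (p : String) : List (String × String) :=
  (rules.filter (fun r => r.2.1 == p)).map (fun r => (r.1, r.2.2))

-- the conflicting rule id for a port, if any: first later entry whose action differs from the first one's
def pvConf (rules : List (String × String × String)) (p : String) : Option String :=
  match pvEntries rules p with
  | [] => none
  | e0 :: rest => (rest.find? (fun e => e.2 != e0.2)).map (fun e => e.1)

def pvAStep (st : PySem.Dict String String × PySem.Dict String String) (r : String × String × String) :
    PySem.Dict String String × PySem.Dict String String :=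
  let rule_id := r.1; let port := r.2.1; let action := r.2.2
  let fa := st.1; let cf := st.2
  if !fa.contains port then (fa.insert port action, cf)
  else if fa.getD port "" != action && !cf.contains port then (fa, cf.insert port rule_id)
  else (fa, cf)

theorem pvEntries_cons (r : String × String × String) (rest : List (String × String × String)) (p : String) :
    pvEntries (r :: rest) p =
      if r.2.1 == p then (r.1, r.2.2) :: pvEntries rest p else pvEntries rest p := by
  simp only [pvEntries, List.filter_cons]
  split <;> simp

theorem pvA_get (rules : List (String × String × String)) :
    ∀ (fa cf : PySem.Dict String String),
      (∀ p, fa.get? p = none → cf.get? p = none) →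
      ∀ p, (rules.foldl pvAStep (fa, cf)).2.get? p =
        match fa.get? p with
        | some base =>
            match cf.get? p with
            | some r => some r
            | none => ((pvEntries rules p).find? (fun e => e.2 != base)).map (fun e => e.1)
        | none => pvConf rules p := by
  induction rules with
  | nil =>
    intro fa cf hsub p
    simp only [List.foldl_nil]
    cases hfa : fa.get? p with
    | none => simp [pvConf, pvEntries, hsub p hfa]
    | some base =>
      cases hcf : cf.get? p with
      | none => simp [pvEntries]
      | some r => simp
  | cons r rest ih =>
    intro fa cf hsub p
    obtain ⟨rid, port, act⟩ := r
    rw [List.foldl_cons]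
    by_cases hc : fa.get? port = none
    · -- fresh port: first_action[port] = action
      have hstep : pvAStep (fa, cf) (rid, port, act) = (fa.insert port act, cf) := by
        simp [pvAStep, PySem.Dict.contains_eq_isSome_get?, hc]
      rw [hstep]
      have hsub' : ∀ q, (fa.insert port act).get? q = none → cf.get? q = none := by
        intro q hq
        rw [PySem.Dict.get?_insert] at hq
        by_cases h : q = port
        · simp [h] at hq
        · exact hsub q (by simpa [h] using hq)
      rw [ih _ _ hsub' p]
      by_cases hp : p = port
      · subst hp
        rw [PySem.Dict.get?_insert_self, hc, hsub p hc]
        simp [pvConf, pvEntries_cons]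
      · rw [PySem.Dict.get?_insert_of_ne _ _ hp]
        have hne : (port == p) = false := by simp [Ne.symm hp]
        cases hfa : fa.get? p with
        | some base => simp [pvEntries_cons, hne]
        | none => simp [pvConf, pvEntries_cons, hne]
    · obtain ⟨base, hbase⟩ := Option.ne_none_iff_exists'.mp hc
      have hcont : fa.contains port = true := by
        rw [PySem.Dict.contains_eq_isSome_get?, hbase]; rfl
      have hgetD : fa.getD port "" = base := PySem.Dict.getD_of_get?_eq_some fa "" hbase
      by_cases hcf : cf.get? port = none
      · by_cases hact : act = base
        · -- same action again: nothing happens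
          subst hact
          have hstep : pvAStep (fa, cf) (rid, port, act) = (fa, cf) := by
            simp [pvAStep, hcont, hgetD]
          rw [hstep, ih _ _ hsub p]
          by_cases hp : p = port
          · subst hp
            rw [hbase, hcf]
            simp [pvEntries_cons]
          · have hne : (port == p) = false := by simp [Ne.symm hp]
            cases hfa : fa.get? p with
            | some b2 => simp [pvEntries_cons, hne]
            | none => simp [pvConf, pvEntries_cons, hne]
        · -- conflict recorded
          have hccont : cf.contains port = false := by
            rw [PySem.Dict.contains_eq_isSome_get?, hcf]; rfl
          have hact' : ¬base = act := fun h => hact h.symm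
          have hstep : pvAStep (fa, cf) (rid, port, act) = (fa, cf.insert port rid) := by
            simp [pvAStep, hcont, hgetD, hccont, bne, hact']
          rw [hstep]
          have hsub' : ∀ q, fa.get? q = none → (cf.insert port rid).get? q = none := by
            intro q hq
            have h : q ≠ port := fun h => hc (h ▸ hq)
            rw [PySem.Dict.get?_insert_of_ne _ _ h]
            exact hsub q hq
          rw [ih _ _ hsub' p]
          by_cases hp : p = port
          · subst hp
            rw [hbase, PySem.Dict.get?_insert_self, hcf]
            have : ((act != base) = true) := by simpa [bne] using hact
            simp [pvEntries_cons, this]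
          · have hne : (port == p) = false := by simp [Ne.symm hp]
            rw [PySem.Dict.get?_insert_of_ne _ _ hp]
            cases hfa : fa.get? p with
            | some b2 => simp [pvEntries_cons, hne]
            | none => simp [pvConf, pvEntries_cons, hne]
      · -- conflict already recorded
        obtain ⟨r0, hr0⟩ := Option.ne_none_iff_exists'.mp hcf
        have hccont : cf.contains port = true := by
          rw [PySem.Dict.contains_eq_isSome_get?, hr0]; rfl
        have hstep : pvAStep (fa, cf) (rid, port, act) = (fa, cf) := by
          simp [pvAStep, hcont, hccont]
        rw [hstep, ih _ _ hsub p]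
        by_cases hp : p = port
        · subst hp
          rw [hbase, hr0]
        · have hne : (port == p) = false := by simp [Ne.symm hp]
          cases hfa : fa.get? p with
          | some b2 => simp [pvEntries_cons, hne]
          | none => simp [pvConf, pvEntries_cons, hne]

theorem pvA_nodup (rules : List (String × String × String)) :
    ∀ (fa cf : PySem.Dict String String), cf.keys.Nodup →
      (rules.foldl pvAStep (fa, cf)).2.keys.Nodup := by
  induction rules with
  | nil => intro fa cf h; simpa using h
  | cons r rest ih =>
    intro fa cf h
    rw [List.foldl_cons]
    apply ih
    cases h1 : fa.contains r.2.1 with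
    | false => simpa [pvAStep, h1] using h
    | true =>
      cases h2 : cf.contains r.2.1 with
      | true => simpa [pvAStep, h1, h2] using h
      | false =>
        cases h3 : fa.getD r.2.1 "" != r.2.2 with
        | true => simpa [pvAStep, h1, h2, h3] using PySem.Dict.nodup_keys_insert cf r.2.1 r.1 h
        | false => simpa [pvAStep, h1, h2, h3] using h

-- the (port, rule_id) pair a conflicting port contributes
def pvPair (rules : List (String × String × String)) (p : String) : String × String :=
  (p, (pvConf rules p).getD "")

-- B's per-group judgement, as a list-valued function
def pvH (pe : String × List (String × String)) : List (String × String) :=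
  match pe.2 with
  | [] => []
  | e0 :: rest =>
    match rest.find? (fun e => e.2 != e0.2) with
    | some e => [(pe.1, e.1)]
    | none => []

def pvGroups (rules : List (String × String × String)) : PySem.Dict String (List (String × String)) :=
  rules.foldl (fun d r => d.modify r.2.1 [] (fun l => l ++ [(r.1, r.2.2)])) PySem.Dict.empty

theorem pvGroups_getD (rules : List (String × String × String)) (p : String) :
    (pvGroups rules).getD p [] = pvEntries rules p := by
  have hmap : pvGroups rules =
      (rules.map (fun r => (r.2.1, (r.1, r.2.2)))).foldl
        (fun d q => d.modify q.1 [] (fun l => l ++ [q.2])) PySem.Dict.empty := by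
    rw [List.foldl_map]
    rfl
  rw [hmap, PySem.Dict.getD_foldl_modify_append]
  simp [pvEntries, PySem.Dict.getD_empty, List.filter_map, Function.comp_def]

theorem pvGroups_nodup (rules : List (String × String × String)) :
    (pvGroups rules).keys.Nodup := by
  have := PySem.Dict.nodup_keys_foldl_modify_key rules (fun r => r.2.1) []
    (fun _ r => fun l => l ++ [(r.1, r.2.2)]) PySem.Dict.empty
  simp only [PySem.Dict.keys_empty] at this
  exact this List.nodup_nil

theorem pvGroups_mem_keys (rules : List (String × String × String)) (p : String) :
    p ∈ (pvGroups rules).keys ↔ p ∈ rules.map (fun r => r.2.1) := by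
  have hk : (pvGroups rules).keys = PySem.Set.update PySem.Dict.empty.keys (rules.map (fun r => r.2.1)) :=
    PySem.Dict.keys_foldl_modify_key rules (fun r => r.2.1) [] (fun _ r => fun l => l ++ [(r.1, r.2.2)]) _
  rw [hk]
  simp only [PySem.Dict.keys_empty]
  have : PySem.Set.update ([] : List String) (rules.map (fun r => r.2.1)) =
      PySem.Set.ofList (rules.map (fun r => r.2.1)) := rfl
  rw [this, PySem.Set.mem_ofList]

theorem pvConf_isSome_mem (rules : List (String × String × String)) (p : String) :
    (pvConf rules p).isSome = true → p ∈ rules.map (fun r => r.2.1) := by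
  intro h
  by_contra hmem
  have hent : pvEntries rules p = [] := by
    simp only [pvEntries, List.map_eq_nil_iff, List.filter_eq_nil_iff]
    intro r hr
    simp only [beq_iff_eq]
    intro he
    exact hmem (List.mem_map.mpr ⟨r, hr, he⟩)
  rw [pvConf, hent] at h
  simp at h

-- a flatMap of an option-valued per-key judgement is a filter + map over the keys
theorem pvFlatMap_opt (ks : List String) (c : String → Option String) :
    (ks.flatMap (fun p => match c p with | some r => [(p, r)] | none => [])) =
      (ks.filter (fun p => (c p).isSome)).map (fun p => (p, (c p).getD "")) := by
  induction ks with
  | nil => rfl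
  | cons k ks ih =>
    cases hk : c k with
    | some r => simp [List.flatMap_cons, hk, ih]
    | none => simp [List.flatMap_cons, hk, ih]

theorem pvB_conflicts (rules : List (String × String × String)) :
    ((pvGroups rules).items.foldl (fun acc pe =>
        match pe.2 with
        | [] => acc
        | e0 :: rest =>
          match rest.find? (fun e => e.2 != e0.2) with
          | some e => acc ++ [(pe.1, e.1)]
          | none => acc) []) =
      ((pvGroups rules).keys.filter (fun p => (pvConf rules p).isSome)).map (pvPair rules) := by
  have hfn : (fun (acc : List (String × String)) (pe : String × List (String × String)) =>
      match pe.2 with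
      | [] => acc
      | e0 :: rest =>
        match rest.find? (fun e => e.2 != e0.2) with
        | some e => acc ++ [(pe.1, e.1)]
        | none => acc) = (fun acc pe => acc ++ pvH pe) := by
    funext acc pe
    rcases pe with ⟨p, entries⟩
    rcases entries with _ | ⟨e0, rest⟩
    · simp [pvH]
    · rcases hf : rest.find? (fun e => e.2 != e0.2) with _ | e <;> simp [pvH, hf]
  rw [hfn, PySem.List.foldl_append_eq_flatMap, List.nil_append]
  rw [PySem.Dict.items_eq_map_keys (pvGroups rules) (pvGroups_nodup rules) [], List.flatMap_map]
  have hH : ∀ p, pvH (p, (pvGroups rules).getD p []) =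
      match pvConf rules p with | some r => [(p, r)] | none => [] := by
    intro p
    rw [pvGroups_getD]
    rcases h : pvEntries rules p with _ | ⟨e0, rest⟩
    · simp [pvH, pvConf, h]
    · rcases hf : rest.find? (fun e => e.2 != e0.2) with _ | e
      · simp [pvH, pvConf, h, hf]
      · simp [pvH, pvConf, h, hf]
  calc ((pvGroups rules).keys.flatMap fun p => pvH (p, (pvGroups rules).getD p []))
      = (pvGroups rules).keys.flatMap (fun p => match pvConf rules p with | some r => [(p, r)] | none => []) := by
        exact List.flatMap_congr (fun p _ => hH p)
    _ = _ := by
        rw [pvFlatMap_opt]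
        rfl

-- insertion with pointwise-equal comparators
theorem pvInsertBy_congr {α : Type} (b1 b2 : α → α → Bool) (x : α) :
    ∀ (ys : List α), (∀ y ∈ ys, b1 x y = b2 x y) →
      PySem.List.insertBy b1 x ys = PySem.List.insertBy b2 x ys := by
  intro ys
  induction ys with
  | nil => intro _; rfl
  | cons y ys ih =>
    intro h
    simp only [PySem.List.insertBy]
    rw [h y (by simp)]
    split
    · rfl
    · rw [ih (fun z hz => h z (by simp [hz]))]

theorem pvFoldl_insertBy_congr {α : Type} (b1 b2 : α → α → Bool) :
    ∀ (l acc : List α), (∀ a ∈ l ++ acc, ∀ b ∈ l ++ acc, b1 a b = b2 a b) →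
      l.foldl (fun acc x => PySem.List.insertBy b1 x acc) acc =
      l.foldl (fun acc x => PySem.List.insertBy b2 x acc) acc := by
  intro l
  induction l with
  | nil => intro _ _; rfl
  | cons x l ih =>
    intro acc h
    simp only [List.foldl_cons]
    have hx : PySem.List.insertBy b1 x acc = PySem.List.insertBy b2 x acc :=
      pvInsertBy_congr b1 b2 x acc (fun y hy => h x (by simp) y (by simp [hy]))
    rw [hx]
    apply ih
    intro a ha b hb
    have hmem : ∀ z, z ∈ l ++ PySem.List.insertBy b2 x acc → z ∈ (x :: l) ++ acc := by
      intro z hz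
      rcases List.mem_append.mp hz with hz | hz
      · simp [hz]
      · rcases (PySem.List.insertBy_mem_iff b2 x z acc).mp hz with hz | hz <;> simp [hz]
    exact h a (hmem a ha) b (hmem b hb)

-- Python compares the whole (port, rule_id) tuple; when the ports are distinct this is the port order
theorem pvSorted2_eq_sorted (xs : List (String × String)) (h : (xs.map Prod.fst).Nodup) :
    PySem.List.sorted2 xs (fun p => p.1) (fun p => p.2) = PySem.List.sorted xs (fun p => p.1) := by
  have h2 : PySem.List.sorted2 xs (fun p => p.1) (fun p => p.2) =
      xs.foldl (fun acc x => PySem.List.insertBy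
        (fun a b => decide (a.1 < b.1) || (!decide (b.1 < a.1) && decide (a.2 < b.2))) x acc) [] := rfl
  rw [h2, PySem.List.sorted_eq_foldl_insertBy]
  apply pvFoldl_insertBy_congr
  intro a ha b hb
  simp only [List.append_nil] at ha hb
  rcases lt_trichotomy a.1 b.1 with h1 | h1 | h1
  · simp [h1]
  · have hab : a = b := List.inj_on_of_nodup_map h ha hb h1
    subst hab
    simp
  · simp [h1, asymm h1]

theorem pvMain (rules : List (String × String × String)) :
    find_conflicting_ports rules = find_conflicting_ports_alt rules := by
  -- final state of A's loop
  have hAget : ∀ p, (rules.foldl pvAStep (PySem.Dict.empty, PySem.Dict.empty)).2.get? p = pvConf rules p := by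
    intro p
    rw [pvA_get rules PySem.Dict.empty PySem.Dict.empty (fun _ _ => PySem.Dict.get?_empty _) p]
    simp [PySem.Dict.get?_empty]
  have hAnodup : (rules.foldl pvAStep (PySem.Dict.empty, PySem.Dict.empty)).2.keys.Nodup := by
    apply pvA_nodup
    simp [PySem.Dict.keys_empty]
  set cfF := (rules.foldl pvAStep (PySem.Dict.empty, PySem.Dict.empty)).2 with hcfF
  -- A's pre-sort list
  have hLA : cfF.items = cfF.keys.map (pvPair rules) := by
    rw [PySem.Dict.items_eq_map_keys cfF hAnodup ""]
    apply List.map_congr_left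
    intro k _
    simp only [pvPair, PySem.Dict.getD_eq_get?_getD, hAget k]
  -- key sets agree
  set KB := (pvGroups rules).keys.filter (fun p => (pvConf rules p).isSome) with hKB
  have hKBnodup : KB.Nodup := (pvGroups_nodup rules).filter _
  have hmemKA : ∀ p, p ∈ cfF.keys ↔ (pvConf rules p).isSome = true := by
    intro p
    constructor
    · intro hp
      cases hcp : pvConf rules p with
      | none => exact absurd ((PySem.Dict.get?_eq_none_iff_not_mem_keys cfF p).mp ((hAget p).trans hcp) hp) (fun x => x)
      | some r => rfl
    · intro hp
      by_contra hnp
      have := (PySem.Dict.get?_eq_none_iff_not_mem_keys cfF p).mpr hnp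
      rw [hAget p] at this
      rw [this] at hp
      simp at hp
  have hmem : ∀ p, p ∈ cfF.keys ↔ p ∈ KB := by
    intro p
    rw [hmemKA, hKB, List.mem_filter]
    constructor
    · intro hp
      exact ⟨(pvGroups_mem_keys rules p).mpr (pvConf_isSome_mem rules p hp), hp⟩
    · intro ⟨_, hp⟩
      exact hp
  have hperm : cfF.keys.Perm KB := (List.perm_ext_iff_of_nodup hAnodup hKBnodup).mpr hmem
  -- the common sorted key list
  set S := PySem.List.sorted cfF.keys (fun x => x) with hS
  have hSperm : S.Perm cfF.keys := PySem.List.sorted_perm _ _ _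
  have hSnodup : S.Nodup := (hSperm.nodup_iff).mpr hAnodup
  have hSlt : S.Pairwise (· < ·) := by
    have hle : S.Pairwise (fun a b => a ≤ b) := PySem.List.sorted_pairwise cfF.keys (fun x => x)
    exact (hle.and hSnodup).imp (fun h => lt_of_le_of_ne h.1 h.2)
  -- both sides sort their list (by port) to S.map (pvPair rules)
  have hsorted : ∀ (K : List String), K.Perm cfF.keys →
      PySem.List.sorted (K.map (pvPair rules)) (fun p => p.1) = S.map (pvPair rules) := by
    intro K hK
    apply PySem.List.sorted_eq_of_perm_of_pairwise_lt
    · exact (hSperm.trans hK.symm).map _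
    · rw [List.pairwise_map]
      exact hSlt.imp (fun h => h)
  have hfst : ∀ (K : List String), (K.map (pvPair rules)).map Prod.fst = K := by
    intro K
    rw [List.map_map]
    simp [pvPair, Function.comp_def]
  -- assemble
  show PySem.List.sorted2 cfF.items (fun p => p.1) (fun p => p.2) = _
  rw [find_conflicting_ports_alt]
  rw [show (rules.foldl (fun d r => d.modify r.2.1 [] (fun l => l ++ [(r.1, r.2.2)])) PySem.Dict.empty) = pvGroups rules from rfl]
  rw [pvB_conflicts rules]
  rw [hLA]
  rw [pvSorted2_eq_sorted _ (by rw [hfst]; exact hAnodup)]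
  rw [pvSorted2_eq_sorted _ (by rw [hfst]; exact hKBnodup)]
  rw [hsorted cfF.keys (List.Perm.refl _), hsorted KB hperm.symm]

theorem find_conflicting_ports_spec : Claim_equal_find_conflicting_ports := by
  intro rules _
  unfold Spec_find_conflicting_ports
  exact pvMain rules
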